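-- pv_equiv track=rewrite | github.com/meghnagram/OPPE1-MAY-2025-SET2 | Section2-Problem1-2025-MAY-SET2.py | count_unique_even_odd
-- ===== SOURCE A (Python) =====
-- def count_unique_even_odd(l: list)-> dict:
--     '''Returns a dict with the count of unique even and odd numbers in the list.
--
--     Eg.
--     >>>l = [1, 2, 2, 3, 4, 5, 5, 6]
--     >>>count_unique_even_odd(l)
--     {"even": 3, "odd": 3}
--
--     Args:
--         l(list)  : a list of integers.
--
--     Returns:
--         dict: a dict with the count of unique even and odd numbers in the list.
--     '''
--
--
--     counts = {'even':0,"odd":0}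
--     for num in set(l):
--         if(num % 2 == 0):
--             counts['even'] += 1
--         else:
--             counts['odd'] += 1
--     return counts
-- ===== SOURCE B (Python) =====
-- def count_unique_even_odd(l: list) -> dict:
--     '''Returns a dict with the count of unique even and odd numbers in the list.
--
--     Sort-then-scan: after sorting, equal values are adjacent, so each distinct
--     value is counted exactly once, at the first element of its run. No set and
--     no counters dict are built.
--     '''
--     e = o = 0
--     prev = None
--     for x in sorted(l):
--         if prev is None or x != prev:
--             if x % 2 == 0:
--                 e += 1
--             else:
--                 o += 1
--         prev = x
--     return {'even': e, 'odd': o}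
-- ===== Notes on version B (the rewrite author's own statement) =====
-- stated objective: alternative
-- what changed: B sorts the list and counts the first element of each run of equal values by parity in one scan, instead of A's hash set iterated while incrementing an even/odd counters dict.
import Mathlib
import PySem

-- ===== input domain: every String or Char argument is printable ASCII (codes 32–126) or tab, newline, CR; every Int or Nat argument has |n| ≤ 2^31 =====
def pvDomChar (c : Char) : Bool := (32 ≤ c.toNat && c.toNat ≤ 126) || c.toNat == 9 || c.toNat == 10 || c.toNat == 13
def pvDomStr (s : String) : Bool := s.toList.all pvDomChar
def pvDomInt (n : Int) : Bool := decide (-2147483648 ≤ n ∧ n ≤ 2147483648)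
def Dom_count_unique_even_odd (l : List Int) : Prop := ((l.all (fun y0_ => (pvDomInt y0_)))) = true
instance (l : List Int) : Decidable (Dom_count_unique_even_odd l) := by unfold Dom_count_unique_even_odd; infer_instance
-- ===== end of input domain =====

-- B is an alternative algorithm: sort, then count the first element of each run of equal
-- values by parity in one scan — no set and no counters dict.
-- A's returned dict does not depend on Python's set iteration order (two fixed keys, commutative increments).

-- ===== PORT A =====
def count_unique_even_odd (l : List Int) : List (String × Int) :=
  let counts : PySem.Dict String Int := PySem.Dict.ofList [("even", 0), ("odd", 0)]
  ((PySem.Set.ofList l).foldl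
    (fun d num =>
      if PySem.Int.mod num 2 == 0 then d.modify "even" 0 (· + 1)
      else d.modify "odd" 0 (· + 1))
    counts).items

-- ===== PORT B =====
-- Source B's loop body: state is (prev, e, o); 'prev is None or x != prev' starts a new run.
def stepB (st : Option Int × Int × Int) (x : Int) : Option Int × Int × Int :=
  let (p, e, o) := st
  if (match p with | none => true | some v => x != v) then
    if PySem.Int.mod x 2 == 0 then (some x, e + 1, o) else (some x, e, o + 1)
  else (some x, e, o)

def count_unique_even_odd_alt (l : List Int) : List (String × Int) :=
  let st := (PySem.List.sorted l (fun x => x) false).foldl stepB (none, 0, 0)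
  [("even", st.2.1), ("odd", st.2.2)]

-- ===== PRECONDITION & SPEC =====
def Spec_count_unique_even_odd (l : List Int) (out : List (String × Int)) : Prop := out = count_unique_even_odd_alt l
instance (l : List Int) (out : List (String × Int)) : Decidable (Spec_count_unique_even_odd l out) := by unfold Spec_count_unique_even_odd; infer_instance

-- ===== CLAIM (what is proved, stated in full; the proofs are below) =====
def Claim_equal_count_unique_even_odd : Prop := ∀ (l : List Int), Dom_count_unique_even_odd l → Spec_count_unique_even_odd l (count_unique_even_odd l)

-- ===== LEMMAS AND PROOFS =====

-- A's loop body, named for the proofs.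
def stepA (d : PySem.Dict String Int) (num : Int) : PySem.Dict String Int :=
  if PySem.Int.mod num 2 == 0 then d.modify "even" 0 (· + 1) else d.modify "odd" 0 (· + 1)

-- The evenness predicate both versions branch on.
def pE (x : Int) : Bool := PySem.Int.mod x 2 == 0

-- One step of A's loop on the two-key dict literal.
theorem stepA_even (e o x : Int) (h : pE x = true) :
    stepA (PySem.Dict.mk [("even", e), ("odd", o)]) x = PySem.Dict.mk [("even", e + 1), ("odd", o)] := by
  have hb : stepA (PySem.Dict.mk [("even", e), ("odd", o)]) x
      = (PySem.Dict.mk [("even", e), ("odd", o)]).modify "even" 0 (· + 1) := by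
    simp only [stepA, pE] at h ⊢; rw [if_pos h]
  rw [hb]
  simp [pysem, PySem.Dict.modify, PySem.Dict.insert, PySem.Dict.getD, PySem.Dict.get?]

theorem stepA_odd (e o x : Int) (h : pE x = false) :
    stepA (PySem.Dict.mk [("even", e), ("odd", o)]) x = PySem.Dict.mk [("even", e), ("odd", o + 1)] := by
  have hb : stepA (PySem.Dict.mk [("even", e), ("odd", o)]) x
      = (PySem.Dict.mk [("even", e), ("odd", o)]).modify "odd" 0 (· + 1) := by
    simp only [stepA, pE] at h ⊢; rw [if_neg (by simp only [h]; exact Bool.false_ne_true)]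
  rw [hb]
  simp [pysem, PySem.Dict.modify, PySem.Dict.insert, PySem.Dict.getD, PySem.Dict.get?]

-- A's loop on ANY list u, started from arbitrary counts (e, o).
theorem loopA (u : List Int) (e o : Int) :
    (u.foldl stepA (PySem.Dict.mk [("even", e), ("odd", o)])).items
    = [("even", e + ((u.filter pE).length : Int)),
       ("odd", o + ((u.filter (fun x => ! pE x)).length : Int))] := by
  induction u generalizing e o with
  | nil => simp
  | cons x u ih =>
      rcases h : pE x with _ | _
      · rw [List.foldl_cons, stepA_odd e o x h, ih]
        simp only [List.filter_cons, h, Bool.not_false, if_true, if_false,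
          Bool.false_eq_true, List.length_cons, List.cons.injEq, Prod.mk.injEq, true_and]
        constructor <;> push_cast <;> ring
      · rw [List.foldl_cons, stepA_even e o x h, ih]
        simp only [List.filter_cons, h, Bool.not_true, if_true, if_false,
          Bool.false_eq_true, List.length_cons, List.cons.injEq, Prod.mk.injEq, true_and]
        constructor <;> push_cast <;> ring

-- The run heads B's scan counts: drop every element equal to the previous kept/seen one.
def adj : Option Int → List Int → List Int
  | _, [] => []
  | p, x :: t => if p == some x then adj p t else x :: adj (some x) t

-- B's fold counts exactly the run heads (the elements of adj p t), split by parity.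
theorem scan_eq (t : List Int) : ∀ (p : Option Int) (e o : Int),
    (t.foldl stepB (p, e, o)).2
    = (e + (((adj p t).filter pE).length : Int),
       o + (((adj p t).filter (fun x => ! pE x)).length : Int)) := by
  induction t with
  | nil => intro p e o; simp [adj]
  | cons x t ih =>
      intro p e o
      rcases hp : p == some x with _ | _
      · have hstep : stepB (p, e, o) x
            = if pE x then (some x, e + 1, o) else (some x, e, o + 1) := by
          cases p with
          | none => simp only [stepB, pE, if_true]; rfl
          | some v =>
              simp only [beq_eq_false_iff_ne, ne_eq, Option.some.injEq] at hp
              have hb : (x != v) = true := by simp [bne_iff_ne]; exact fun h => hp h.symm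
              simp only [stepB, pE, hb, if_true]; rfl
        rcases hx : pE x with _ | _
        · rw [List.foldl_cons, hstep, if_neg (by simp [hx]), ih, adj, if_neg (by simp [hp])]
          simp only [List.filter_cons, hx, Bool.not_false, if_true, Bool.false_eq_true, if_false,
            List.length_cons, Prod.mk.injEq]
          constructor <;> push_cast <;> ring
        · rw [List.foldl_cons, hstep, if_pos hx, ih, adj, if_neg (by simp [hp])]
          simp only [List.filter_cons, hx, Bool.not_true, if_true, Bool.false_eq_true, if_false,
            List.length_cons, Prod.mk.injEq]
          constructor <;> push_cast <;> ring
      · have hpx : p = some x := by cases p <;> simp_all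
        subst hpx
        have hstep : stepB (some x, e, o) x = (some x, e, o) := by simp [stepB]
        rw [List.foldl_cons, hstep, ih]
        simp [adj]

-- Folding Set.add over u skips every element already in the accumulator: duplicates of x
-- may be filtered out of u without changing the result.
theorem foldl_add_skip (u : List Int) (s : PySem.Set Int) (x : Int) (hx : x ∈ s) :
    u.foldl PySem.Set.add s = (u.filter (fun y => y != x)).foldl PySem.Set.add s := by
  induction u generalizing s with
  | nil => rfl
  | cons y u ih =>
      by_cases h : y = x
      · subst h
        have : PySem.Set.add s y = s := by
          simp [PySem.Set.add, PySem.Set.contains]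
          exact hx
        simp [this, ih _ hx]
      · have hy : (y != x) = true := by simp [h]
        simp only [List.filter_cons, hy, if_true, List.foldl_cons]
        exact ih _ (by by_cases hys : y ∈ s <;> simp [PySem.Set.add, hx, hys])

-- If no element of u equals x, a head x in the accumulator just rides along.
theorem foldl_add_head (u : List Int) (s : PySem.Set Int) (x : Int)
    (hu : ∀ y ∈ u, y ≠ x) :
    u.foldl PySem.Set.add (x :: s) = x :: u.foldl PySem.Set.add s := by
  induction u generalizing s with
  | nil => rfl
  | cons y u ih =>
      have hyx : y ≠ x := hu y (by simp)
      have hc : PySem.Set.add (x :: s) y = x :: PySem.Set.add s y := by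
        simp [PySem.Set.add, PySem.Set.contains, hyx]
        split <;> simp
      rw [List.foldl_cons, hc, ih _ (fun y hy => hu y (by simp [hy])), List.foldl_cons]

-- set(x::t) = x :: set(t with the duplicates of x removed).
theorem ofList_cons (x : Int) (t : List Int) :
    PySem.Set.ofList (x :: t) = x :: PySem.Set.ofList (t.filter (fun y => y != x)) := by
  have h0 : PySem.Set.ofList (x :: t) = t.foldl PySem.Set.add [x] := by
    simp [PySem.Set.ofList_eq_foldl, PySem.Set.add, PySem.Set.contains]
  rw [h0, foldl_add_skip t [x] x (by simp),
    foldl_add_head _ [] x (fun y hy => by simpa using (List.mem_filter.mp hy).2),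
    PySem.Set.ofList_eq_foldl]

-- On a sorted tail, a remembered head x suppresses exactly the duplicates of x.
theorem adj_some (x : Int) (t : List Int) (h : (x :: t).Pairwise (· ≤ ·)) :
    adj (some x) t = adj none (t.filter (fun y => y != x)) := by
  induction t with
  | nil => rfl
  | cons z t ih =>
      by_cases hzx : z = x
      · subst hzx
        have h' : (z :: t).Pairwise (· ≤ ·) := h.sublist (by simp)
        have hL : adj (some z) (z :: t) = adj (some z) t := by simp [adj]
        rw [hL, List.filter_cons]
        simp only [bne_self_eq_false, Bool.false_eq_true, if_false]
        exact ih h'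
      · have hxz : x ≤ z := (List.pairwise_cons.mp h).1 z (by simp)
        have hlt : ∀ y ∈ t, y ≠ x := by
          intro y hy hyx
          subst hyx
          have hzy : z ≤ y := (List.pairwise_cons.mp (List.pairwise_cons.mp h).2).1 y hy
          exact hzx (le_antisymm hzy hxz)
        have hfilt : t.filter (fun y => y != x) = t :=
          List.filter_eq_self.mpr (fun y hy => by simpa using hlt y hy)
        have hzxb : (z != x) = true := by simpa using hzx
        have hsx : ((some x : Option Int) == some z) = false := by
          rw [beq_eq_false_iff_ne]; exact fun hh => hzx (Option.some.inj hh).symm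
        have hL : adj (some x) (z :: t) = z :: adj (some z) t := by
          rw [adj, if_neg (by simp [hsx])]
        have hR : adj none (z :: t.filter (fun y => y != x)) = z :: adj (some z) (t.filter (fun y => y != x)) := by
          rw [adj, if_neg (by simp)]
        rw [List.filter_cons, if_pos hzxb, hL, hR, hfilt]

-- On a sorted list, removing adjacent duplicates is exactly set(s).
theorem adj_sorted_aux (n : Nat) : ∀ (s : List Int), s.length ≤ n → s.Pairwise (· ≤ ·) →
    adj none s = PySem.Set.ofList s := by
  induction n with
  | zero =>
      intro s h _
      have : s = [] := List.eq_nil_of_length_eq_zero (Nat.le_zero.mp h)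
      subst this; rfl
  | succ n ih =>
      intro s h hs
      match s with
      | [] => rfl
      | x :: t =>
        have hlen : (t.filter (fun y => y != x)).length ≤ n :=
          le_trans (List.length_filter_le _ _) (by simpa using h)
        have hp : (t.filter (fun y => y != x)).Pairwise (· ≤ ·) :=
          (List.pairwise_cons.mp hs).2.filter _
        rw [adj, if_neg (by simp), adj_some x t hs, ih _ hlen hp, ofList_cons]

-- set(sorted(l)) and set(l) have equal even/odd filter lengths (nodup + same members ⇒ perm).
theorem ofList_sorted_filter_len (l : List Int) (p : Int → Bool) :
    ((PySem.Set.ofList (PySem.List.sorted l (fun x => x) false)).filter p).length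
    = ((PySem.Set.ofList l).filter p).length := by
  have hperm : (PySem.Set.ofList (PySem.List.sorted l (fun x => x) false)).Perm
      (PySem.Set.ofList l) := by
    refine (List.perm_ext_iff_of_nodup (PySem.Set.nodup_ofList _) (PySem.Set.nodup_ofList _)).mpr ?_
    intro a
    simp only [PySem.Set.mem_ofList]
    exact ⟨fun ha => (PySem.List.sorted_perm l (fun x => x) false).mem_iff.mp ha,
           fun ha => (PySem.List.sorted_perm l (fun x => x) false).mem_iff.mpr ha⟩
  exact (hperm.filter p).length_eq

-- ===== VERDICT (by name: the statement is the Claim_ definition above) =====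
theorem count_unique_even_odd_spec : Claim_equal_count_unique_even_odd := by
  intro l _
  unfold Spec_count_unique_even_odd count_unique_even_odd count_unique_even_odd_alt
  have hof : PySem.Dict.ofList [("even", (0:Int)), ("odd", (0:Int))]
      = PySem.Dict.mk [("even", 0), ("odd", 0)] := by decide
  have hsA : (fun (d : PySem.Dict String Int) (num : Int) =>
      if PySem.Int.mod num 2 == 0 then d.modify "even" 0 (· + 1) else d.modify "odd" 0 (· + 1))
      = stepA := rfl
  have hadj : adj none (PySem.List.sorted l (fun x => x) false)
      = PySem.Set.ofList (PySem.List.sorted l (fun x => x) false) :=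
    adj_sorted_aux _ _ le_rfl (by simpa using PySem.List.sorted_pairwise l (fun x => x))
  simp only [hof, hsA, loopA, scan_eq, hadj, ofList_sorted_filter_len, zero_add]
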